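-- pv_equiv track=rewrite | github.com/szabo137/programmieraufgaben | pkteausdateinamen/punkteausdateinamen.py | entfernen
-- ===== SOURCE A (Python) =====
-- def entfernen(liste):
--     zeichenliste=list(liste)
--     pktezaehler=0
--     for i in range(len(zeichenliste)):
--         if zeichenliste[-i-1] == "." and pktezaehler:
--             zeichenliste[-i-1] = ""
--         elif zeichenliste[-i-1] == ".":
--             pktezaehler=1
--     outstring=""
--     for el in zeichenliste:
--         outstring=outstring + str(el)
--     return outstring
-- ===== SOURCE B (Python) =====
-- def entfernen(liste):
--     idx = liste.rfind('.')
--     if idx == -1: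
--         return liste
--     return liste[:idx].replace('.', '') + liste[idx:]
-- ===== Notes on version B (the rewrite author's own statement) =====
-- stated objective: faster
-- what changed: Replaces A's reverse-indexed marker loop over a mutable char list plus a quadratic string-concatenation loop with a single rfind of the last dot followed by slice-and-replace.
import Mathlib
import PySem

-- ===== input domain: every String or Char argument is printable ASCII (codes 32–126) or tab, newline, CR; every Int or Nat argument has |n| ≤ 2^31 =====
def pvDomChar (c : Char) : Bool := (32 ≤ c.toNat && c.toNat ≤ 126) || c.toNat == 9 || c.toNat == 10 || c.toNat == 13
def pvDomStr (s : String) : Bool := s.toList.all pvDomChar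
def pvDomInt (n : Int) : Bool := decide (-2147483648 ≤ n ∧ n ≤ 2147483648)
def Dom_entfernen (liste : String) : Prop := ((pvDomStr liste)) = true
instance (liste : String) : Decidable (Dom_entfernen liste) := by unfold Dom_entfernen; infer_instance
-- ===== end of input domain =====

-- B replaces A's reverse-indexed marker loop + concatenation loop by rfind of the last dot plus slice-and-replace (idiomatic).


-- ===== PORT A =====
-- A's for-loop visits zeichenliste[-i-1] for i = 0 .. n-1, i.e. the characters strictly
-- right-to-left, carrying the flag pktezaehler and blanking dots once the flag is set.
-- markA transcribes that scan: the recursive call processes the suffix (the elements to the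
-- right, visited first), then the head character is handled with the flag produced there,
-- with the two branches in A's order.  str(el) is the identity on these one-char/"" strings.
def markA : List Char → Bool → List String × Bool
  | [], flag => ([], flag)
  | c :: rest, flag =>
    let r := markA rest flag
    if c == '.' && r.2 then ("" :: r.1, r.2)
    else if c == '.' then (String.ofList [c] :: r.1, true)
    else (String.ofList [c] :: r.1, r.2)

def entfernen (liste : String) : String :=
  let zeichenliste := (markA liste.toList false).1
  zeichenliste.foldl (fun outstring el => outstring ++ el) ""

-- ===== PORT B =====
-- hand port of str.rfind('.') (single-character needle): index of the last '.', -1 if none;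
-- exact for this call since the needle is one character.
def rfindDot (cs : List Char) : Int :=
  let r := cs.reverse.findIdx (· == '.')
  if r = cs.length then -1 else ((cs.length - 1 - r : Nat) : Int)

def entfernen_alt (liste : String) : String :=
  let idx := rfindDot liste.toList
  if idx = -1 then liste
  else PySem.Str.replace (PySem.Str.slice liste none (some idx)) "." ""
        ++ PySem.Str.slice liste (some idx) none

-- ===== PRECONDITION & SPEC =====
def Spec_entfernen (liste : String) (out : String) : Prop := out = entfernen_alt liste
instance (liste : String) (out : String) : Decidable (Spec_entfernen liste out) := by unfold Spec_entfernen; infer_instance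

-- ===== CLAIM (what is proved, stated in full; the proofs are below) =====
def Claim_equal_entfernen : Prop := ∀ (liste : String), Dom_entfernen liste → Spec_entfernen liste (entfernen liste)

-- ===== LEMMAS AND PROOFS =====

def dotless (c : Char) : String := if c = '.' then "" else String.ofList [c]

theorem markA_nodot (cs : List Char) (h : '.' ∉ cs) :
    markA cs false = (cs.map (fun c => String.ofList [c]), false) := by
  induction cs with
  | nil => rfl
  | cons c rest ih =>
    simp only [List.mem_cons, not_or] at h
    simp [markA, ih h.2, Ne.symm h.1]

theorem markA_split (p q : List Char) (h : '.' ∉ q) :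
    markA (p ++ '.' :: q) false =
      (p.map dotless ++ String.ofList ['.'] :: q.map (fun c => String.ofList [c]), true) := by
  induction p with
  | nil => simp [markA, markA_nodot q h]
  | cons c p ih =>
    simp only [List.cons_append, markA, ih]
    by_cases hc : c = '.' <;> simp [hc, dotless]

theorem foldl_append_toList (strs : List String) (s : String) :
    (strs.foldl (fun acc el => acc ++ el) s).toList
      = s.toList ++ (strs.map String.toList).flatten := by
  induction strs generalizing s with
  | nil => simp
  | cons t rest ih => simp [List.foldl_cons, ih, String.toList_append]

theorem flatten_dotless (p : List Char) :
    ((p.map dotless).map String.toList).flatten = p.filter (· ≠ '.') := by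
  induction p with
  | nil => rfl
  | cons c rest ih =>
    simp only [List.map_cons, List.flatten_cons, ih, List.filter_cons]
    by_cases h : c = '.' <;> simp [dotless, h]

theorem flatten_single (q : List Char) :
    ((q.map (fun c => String.ofList [c])).map String.toList).flatten = q := by
  induction q with
  | nil => rfl
  | cons c rest ih => simp only [List.map_cons, List.flatten_cons, ih]; simp

theorem rfindDot_nodot (cs : List Char) (h : '.' ∉ cs) : rfindDot cs = -1 := by
  have : cs.reverse.findIdx (· == '.') = cs.reverse.length := by
    rw [List.findIdx_eq_length]
    intro x hx
    have hxne : x ≠ '.' := fun hx' => h (by simpa [hx'] using List.mem_reverse.mp hx)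
    simp [hxne]
  simp only [List.length_reverse] at this
  simp [rfindDot, this]

theorem rfindDot_split (p q : List Char) (h : '.' ∉ q) :
    rfindDot (p ++ '.' :: q) = (p.length : Int) := by
  have hq : q.reverse.findIdx (· == '.') = q.reverse.length := by
    rw [List.findIdx_eq_length]
    intro x hx
    have hxne : x ≠ '.' := fun hx' => h (by simpa [hx'] using List.mem_reverse.mp hx)
    simp [hxne]
  have hfind : (p ++ '.' :: q).reverse.findIdx (· == '.') = q.length := by
    rw [List.reverse_append, List.reverse_cons, List.append_assoc, List.findIdx_append, hq]
    simp [List.findIdx_cons, List.length_reverse]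
  have hlen : (p ++ '.' :: q).length = p.length + q.length + 1 := by simp; omega
  rw [rfindDot]
  simp only [hfind, hlen]
  have hne : q.length ≠ p.length + q.length + 1 := by omega
  simp only [hne, if_false]
  have : p.length + q.length + 1 - 1 - q.length = p.length := by omega
  rw [this]

-- replace cs "." "" is exactly dot-filtering
theorem replace_go_dot (fuel : Nat) (l acc : List Char) (hf : l.length ≤ fuel) :
    PySem.Chars.replace.go ['.'] [] fuel l acc = acc.reverse ++ l.filter (· ≠ '.') := by
  induction fuel generalizing l acc with
  | zero =>
    have hl : l = [] := List.length_eq_zero_iff.mp (Nat.le_zero.mp hf)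
    subst hl
    rw [PySem.Chars.replace.go]
    simp
  | succ n ih =>
    match l with
    | [] => simp [PySem.Chars.replace.go]
    | c :: t =>
      simp only [List.length_cons] at hf
      by_cases hc : c = '.'
      · have hpre : List.isPrefixOf ['.'] (c :: t) = true := by simp [List.isPrefixOf, hc]
        rw [PySem.Chars.replace.go, if_pos hpre]
        simp only [List.length_singleton, List.drop_one, List.tail_cons, List.reverse_nil,
          List.nil_append]
        rw [ih t acc (by omega)]
        simp [hc]
      · have hpre : List.isPrefixOf ['.'] (c :: t) = false := by
          simp [List.isPrefixOf, Ne.symm hc]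
        rw [PySem.Chars.replace.go, if_neg (by simp [hpre])]
        rw [ih t (c :: acc) (by omega)]
        simp [hc]

theorem replace_dot (cs : List Char) :
    PySem.Chars.replace cs ['.'] [] = cs.filter (· ≠ '.') := by
  rw [PySem.Chars.replace, if_neg (by simp)]
  exact replace_go_dot cs.length cs [] le_rfl

theorem exists_last_dot (cs : List Char) (h : '.' ∈ cs) :
    ∃ p q, cs = p ++ '.' :: q ∧ '.' ∉ q := by
  induction cs with
  | nil => cases h
  | cons c rest ih =>
    by_cases hr : '.' ∈ rest
    · obtain ⟨p, q, hpq, hq⟩ := ih hr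
      exact ⟨c :: p, q, by simp [hpq], hq⟩
    · rcases List.mem_cons.mp h with hc | hc
      · exact ⟨[], rest, by simp [hc.symm], hr⟩
      · exact absurd hc hr

-- ===== VERDICT (by name: the statement is the Claim_ definition above) =====
theorem entfernen_spec : Claim_equal_entfernen := by
  intro liste _
  unfold Spec_entfernen entfernen entfernen_alt
  by_cases h : '.' ∈ liste.toList
  · obtain ⟨p, q, hpq, hq⟩ := exists_last_dot liste.toList h
    rw [hpq, markA_split p q hq, rfindDot_split p q hq]
    have hne : (p.length : Int) ≠ -1 := by omega
    simp only [hne, ite_false]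
    apply String.toList_inj.mp
    rw [foldl_append_toList]
    simp only [List.map_append, List.map_cons, List.flatten_append, List.flatten_cons,
      flatten_dotless, flatten_single, String.toList_append]
    have htake : (PySem.Str.slice liste none (some (p.length : Int))).toList = p := by
      rw [PySem.Str.toList_slice, PySem.Chars.slice, PySem.List.slice_to_natCast, hpq]
      simp
    have hdrop : (PySem.Str.slice liste (some (p.length : Int)) none).toList = '.' :: q := by
      rw [PySem.Str.toList_slice, PySem.Chars.slice, PySem.List.slice_from_natCast, hpq]
      simp
    rw [PySem.Str.toList_replace, htake, hdrop]
    simp [replace_dot]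
  · rw [markA_nodot liste.toList h, rfindDot_nodot liste.toList h]
    simp only [reduceIte]
    apply String.toList_inj.mp
    rw [foldl_append_toList, flatten_single]
    simp
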